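-- pv_equiv track=rewrite | github.com/ranjithkumar007/Dolly | util/preprocess.py | filter_vocab
-- ===== SOURCE A (Python) =====
-- def filter_vocab(vocab, cutoff):
--     filtered = []
--     for w, cnt in vocab.items():
--         if cnt < cutoff:
--             filtered.append(w)
--
--     for w in filtered:
--         del vocab[w]
--
--     return vocab
-- ===== SOURCE B (Python) =====
-- def filter_vocab(vocab, cutoff):
--     while True:
--         bad = next((w for w, c in vocab.items() if c < cutoff), None)
--         if bad is None:
--             return vocab
--         del vocab[bad]
-- ===== Notes on version B (the rewrite author's own statement) =====
-- stated objective: alternative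
-- what changed: B has no collect pass and no deletion list: it repeatedly rescans the dict for the first below-cutoff entry and deletes it immediately, looping until no such entry remains, instead of A's two staged passes (collect all low-count keys, then delete them); the in-place mutation and returned object identity are preserved.
import Mathlib
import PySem

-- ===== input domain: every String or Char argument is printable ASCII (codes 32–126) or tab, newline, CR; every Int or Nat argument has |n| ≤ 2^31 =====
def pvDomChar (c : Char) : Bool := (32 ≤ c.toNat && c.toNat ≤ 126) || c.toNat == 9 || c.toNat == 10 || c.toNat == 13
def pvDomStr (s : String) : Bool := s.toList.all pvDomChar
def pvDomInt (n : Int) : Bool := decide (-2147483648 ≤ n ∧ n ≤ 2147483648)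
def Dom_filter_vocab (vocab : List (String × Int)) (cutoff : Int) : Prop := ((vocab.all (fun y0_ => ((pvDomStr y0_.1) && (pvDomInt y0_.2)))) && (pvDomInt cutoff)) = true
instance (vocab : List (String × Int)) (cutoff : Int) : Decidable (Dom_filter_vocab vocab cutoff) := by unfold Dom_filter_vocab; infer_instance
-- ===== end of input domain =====

-- B deletes low-count entries one at a time, rescanning the dict for the next offender after each
-- deletion, instead of A's two staged passes (collect all low-count keys into a list, then delete
-- them); both mutate the argument dict in place and return it; equivalence is about the returned value.


-- ===== PORT A =====
def filter_vocab (vocab : List (String × Int)) (cutoff : Int) : List (String × Int) :=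
  -- filtered = []; for w, cnt in vocab.items(): if cnt < cutoff: filtered.append(w)
  let filtered := vocab.foldl (fun acc p => if p.2 < cutoff then acc ++ [p.1] else acc) ([] : List String)
  -- for w in filtered: del vocab[w]   ; return vocab
  (filtered.foldl (fun d w => d.erase w) (PySem.Dict.mk vocab)).items

-- ===== PORT B =====
-- termination helper for the while-loop: each deletion removes a present entry
lemma erase_items_length_lt (d : PySem.Dict String Int) (p : String × Int)
    (hp : d.items.find? (fun q => q.2 < cutoff) = some p) :
    (d.erase p.1).items.length < d.items.length := by
  have hmem : p ∈ d.items := List.mem_of_find?_eq_some hp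
  cases d with
  | mk l =>
    show (l.filter (fun q => !(q.1 == p.1))).length < l.length
    apply List.length_filter_lt_length_iff_exists.mpr
    exact ⟨p, hmem, by simp⟩

-- while True: bad = next((w for w, c in vocab.items() if c < cutoff), None);
--             if bad is None: return vocab;  del vocab[bad]
def filterLoop (d : PySem.Dict String Int) (cutoff : Int) : List (String × Int) :=
  match h : d.items.find? (fun p => p.2 < cutoff) with
  | none => d.items
  | some p => filterLoop (d.erase p.1) cutoff
termination_by d.items.length
decreasing_by exact erase_items_length_lt d p h

def filter_vocab_alt (vocab : List (String × Int)) (cutoff : Int) : List (String × Int) :=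
  filterLoop (PySem.Dict.mk vocab) cutoff

-- ===== PRECONDITION & SPEC =====
-- Pre_ excludes association lists with duplicate keys: both programs take a Python dict, which
-- cannot hold duplicate keys, so such lists represent no Python input at all.
def Pre_filter_vocab (vocab : List (String × Int)) (_cutoff : Int) : Prop :=
  (vocab.map Prod.fst).Nodup
instance (vocab : List (String × Int)) (cutoff : Int) : Decidable (Pre_filter_vocab vocab cutoff) := by unfold Pre_filter_vocab; infer_instance
def pvWitness_filter_vocab : (List (String × Int)) × Int := ([("a", 1), ("b", 5)], 3)
def Spec_filter_vocab (vocab : List (String × Int)) (cutoff : Int) (out : List (String × Int)) : Prop := out = filter_vocab_alt vocab cutoff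
instance (vocab : List (String × Int)) (cutoff : Int) (out : List (String × Int)) : Decidable (Spec_filter_vocab vocab cutoff out) := by unfold Spec_filter_vocab; infer_instance

-- ===== CLAIM (what is proved, stated in full; the proofs are below) =====
def Claim_equal_filter_vocab : Prop := ∀ (vocab : List (String × Int)) (cutoff : Int), Dom_filter_vocab vocab cutoff → Pre_filter_vocab vocab cutoff → Spec_filter_vocab vocab cutoff (filter_vocab vocab cutoff)

-- ===== LEMMAS AND PROOFS =====

-- A's append-collecting loop produces the keys of the low-count entries, in order.
lemma filtered_eq (vocab : List (String × Int)) (cutoff : Int) :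
    vocab.foldl (fun acc p => if p.2 < cutoff then acc ++ [p.1] else acc) ([] : List String)
      = (vocab.filter (fun p => p.2 < cutoff)).map Prod.fst := by
  have h : ∀ (l : List (String × Int)) (acc : List String),
      l.foldl (fun acc p => if p.2 < cutoff then acc ++ [p.1] else acc) acc
        = acc ++ (l.filter (fun p => p.2 < cutoff)).map Prod.fst := by
    intro l
    induction l with
    | nil => intro acc; simp
    | cons p l ih =>
      intro acc
      by_cases hp : p.2 < cutoff <;> simp [List.foldl_cons, hp, ih]
  simpa using h vocab []

-- A's folded erase loop over a literal dict filters out every listed key.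
lemma foldl_erase_items (ws : List String) (l : List (String × Int)) :
    ((ws.foldl (fun d w => d.erase w) (PySem.Dict.mk l)).items)
      = l.filter (fun p => !ws.contains p.1) := by
  induction ws generalizing l with
  | nil => simp
  | cons w ws ih =>
    simp only [List.foldl_cons]
    have he : (PySem.Dict.mk l).erase w = PySem.Dict.mk (l.filter (fun p => !(p.1 == w))) := rfl
    rw [he, ih, List.filter_filter]
    apply List.filter_congr
    intro p _
    simp only [List.contains_cons]
    cases h : (p.1 == w) <;> simp [h]

-- B's rescan-and-delete loop returns exactly the entries with count ≥ cutoff (nodup keys).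
lemma filterLoop_eq (cutoff : Int) : ∀ (l : List (String × Int)),
    (l.map Prod.fst).Nodup →
    filterLoop (PySem.Dict.mk l) cutoff = l.filter (fun p => !(p.2 < cutoff)) := by
  intro l
  induction hn : l.length using Nat.strong_induction_on generalizing l with
  | _ n ih =>
  intro hnd
  rw [filterLoop]
  split
  · next hfind =>
    have : ∀ p ∈ l, ¬ (p.2 < cutoff) := by
      intro p hp
      have := List.find?_eq_none.mp hfind p hp
      simpa using this
    rw [List.filter_eq_self.mpr (by intro p hp; simpa using this p hp)]
  · next p hfind =>
    have hmem : p ∈ (PySem.Dict.mk l).items := List.mem_of_find?_eq_some hfind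
    have hbad : p.2 < cutoff := by simpa using List.find?_some hfind
    have he : (PySem.Dict.mk l).erase p.1 = PySem.Dict.mk (l.filter (fun q => !(q.1 == p.1))) := rfl
    rw [he]
    have hlen : (l.filter (fun q => !(q.1 == p.1))).length < n := by
      subst hn
      exact List.length_filter_lt_length_iff_exists.mpr ⟨p, hmem, by simp⟩
    have hnd' : ((l.filter (fun q => !(q.1 == p.1))).map Prod.fst).Nodup :=
      ((List.filter_sublist (l := l)).map Prod.fst).nodup hnd
    rw [ih _ hlen _ rfl hnd', List.filter_filter]
    apply List.filter_congr
    intro q hq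
    by_cases hkeep : q.2 < cutoff
    · simp [hkeep]
    · -- q is kept; the erased key p.1 cannot be q's key (p fails keep, q passes; nodup keys)
      have hne : q.1 ≠ p.1 := by
        intro hEq
        have : q = p := List.inj_on_of_nodup_map hnd hq hmem hEq
        rw [this] at hkeep
        exact hkeep hbad
      simp [hkeep, hne]

theorem filter_vocab_spec : Claim_equal_filter_vocab := by
  intro vocab cutoff _ hpre
  unfold Spec_filter_vocab filter_vocab filter_vocab_alt
  rw [filtered_eq, foldl_erase_items, filterLoop_eq cutoff vocab hpre]
  apply List.filter_congr
  intro p hp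
  by_cases hlt : p.2 < cutoff
  · have hmem : p.1 ∈ (vocab.filter (fun q => q.2 < cutoff)).map Prod.fst :=
      List.mem_map.mpr ⟨p, List.mem_filter.mpr ⟨hp, by simpa using hlt⟩, rfl⟩
    simp [hmem, hlt]
  · have hno : p.1 ∉ (vocab.filter (fun q => q.2 < cutoff)).map Prod.fst := by
      rintro hm
      obtain ⟨q, hq, hqp⟩ := List.mem_map.mp hm
      have hq' := List.mem_filter.mp hq
      have : q = p := List.inj_on_of_nodup_map hpre hq'.1 hp hqp
      rw [this] at hq'
      simp at hq'
      omega
    simp [hno, hlt]
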